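-- pv_equiv track=rewrite | github.com/Vishh70/te-connectivity-3 | archive_clutter/train_model.py | _resolve_base_feature
-- ===== SOURCE A (Python) =====
-- def _resolve_base_feature(name: str) -> str | None:
--     if name == "machine_id_encoded":
--         return None
--
--     for suffix in (
--         "_rolling_mean_5",
--         "_rolling_std_5",
--         "_rolling_min_5",
--         "_rolling_max_5",
--         "_lag_1",
--         "_lag_3",
--         "_lag_5",
--         "_rate_of_change_5",
--         "_rate_of_change_30",
--         "_roc_5",
--         "_roc_30",
--     ):
--         if name.endswith(suffix):
--             return name[: -len(suffix)]
--     return name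
-- ===== SOURCE B (Python) =====
-- _S4 = (("rate", "of", "change", "5"), ("rate", "of", "change", "30"))
-- _S3 = (
--     ("rolling", "mean", "5"),
--     ("rolling", "std", "5"),
--     ("rolling", "min", "5"),
--     ("rolling", "max", "5"),
-- )
-- _S2 = (("lag", "1"), ("lag", "3"), ("lag", "5"), ("roc", "5"), ("roc", "30"))
--
--
-- def _resolve_base_feature(name):
--     if name == "machine_id_encoded":
--         return None
--     parts = name.split("_")
--     for k, options in ((4, _S4), (3, _S3), (2, _S2)):
--         if len(parts) > k and tuple(parts[-k:]) in options:
--             return "_".join(parts[:-k])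
--     return name
-- ===== Notes on version B (the rewrite author's own statement) =====
-- stated objective: alternative
-- what changed: B splits the name once into its '_'-separated tokens and matches the trailing 4/3/2-token tuple against fixed tuple tables, instead of A's eleven sequential endswith tests with string slicing.
import Mathlib
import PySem

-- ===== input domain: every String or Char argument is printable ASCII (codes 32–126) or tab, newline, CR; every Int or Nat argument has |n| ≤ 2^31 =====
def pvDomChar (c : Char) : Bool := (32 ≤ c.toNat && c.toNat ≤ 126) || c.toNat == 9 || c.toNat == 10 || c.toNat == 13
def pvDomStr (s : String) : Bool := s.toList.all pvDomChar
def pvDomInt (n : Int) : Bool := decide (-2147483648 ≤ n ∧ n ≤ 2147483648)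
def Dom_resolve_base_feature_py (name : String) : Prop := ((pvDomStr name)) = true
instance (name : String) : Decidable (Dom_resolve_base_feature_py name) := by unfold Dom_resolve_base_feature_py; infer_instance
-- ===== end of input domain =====

-- B re-implements A by splitting the name into its '_'-separated tokens once and matching the trailing
-- token tuple against fixed tuple tables, instead of testing eleven endswith suffixes (alternative algorithm).

-- ===== PORT A =====
-- the eleven suffix literals of A's tuple, as char lists (strings are ported on the List Char side)
def pvSuf1 : List Char := ['_', 'r', 'o', 'l', 'l', 'i', 'n', 'g', '_', 'm', 'e', 'a', 'n', '_', '5']  -- "_rolling_mean_5"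
def pvSuf2 : List Char := ['_', 'r', 'o', 'l', 'l', 'i', 'n', 'g', '_', 's', 't', 'd', '_', '5']  -- "_rolling_std_5"
def pvSuf3 : List Char := ['_', 'r', 'o', 'l', 'l', 'i', 'n', 'g', '_', 'm', 'i', 'n', '_', '5']  -- "_rolling_min_5"
def pvSuf4 : List Char := ['_', 'r', 'o', 'l', 'l', 'i', 'n', 'g', '_', 'm', 'a', 'x', '_', '5']  -- "_rolling_max_5"
def pvSuf5 : List Char := ['_', 'l', 'a', 'g', '_', '1']  -- "_lag_1"
def pvSuf6 : List Char := ['_', 'l', 'a', 'g', '_', '3']  -- "_lag_3"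
def pvSuf7 : List Char := ['_', 'l', 'a', 'g', '_', '5']  -- "_lag_5"
def pvSuf8 : List Char := ['_', 'r', 'a', 't', 'e', '_', 'o', 'f', '_', 'c', 'h', 'a', 'n', 'g', 'e', '_', '5']  -- "_rate_of_change_5"
def pvSuf9 : List Char := ['_', 'r', 'a', 't', 'e', '_', 'o', 'f', '_', 'c', 'h', 'a', 'n', 'g', 'e', '_', '3', '0']  -- "_rate_of_change_30"
def pvSuf10 : List Char := ['_', 'r', 'o', 'c', '_', '5']  -- "_roc_5"
def pvSuf11 : List Char := ['_', 'r', 'o', 'c', '_', '3', '0']  -- "_roc_30"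

def pvSuffixesA : List (List Char) := [pvSuf1, pvSuf2, pvSuf3, pvSuf4, pvSuf5, pvSuf6, pvSuf7, pvSuf8, pvSuf9, pvSuf10, pvSuf11]

-- A's for-loop with early return, as structural recursion over the suffix tuple;
-- name.endswith(suffix) is PySem.Chars.endswith, name[:-len(suffix)] is PySem.Chars.slice with negative stop
def pvLoopA (s : List Char) : List (List Char) → List Char
  | [] => s
  | suf :: rest =>
      if PySem.Chars.endswith s suf then PySem.Chars.slice s none (some (-(suf.length : Int)))
      else pvLoopA s rest

def resolve_base_feature_py (name : String) : Option String :=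
  if name = "machine_id_encoded" then none
  else some (String.ofList (pvLoopA name.toList pvSuffixesA))

-- ===== PORT B =====
-- the token tuples of Source B's _S4/_S3/_S2 tables, as lists of char lists
def pvT1 : List (List Char) := [['r', 'o', 'l', 'l', 'i', 'n', 'g'], ['m', 'e', 'a', 'n'], ['5']]  -- ('rolling', 'mean', '5')
def pvT2 : List (List Char) := [['r', 'o', 'l', 'l', 'i', 'n', 'g'], ['s', 't', 'd'], ['5']]  -- ('rolling', 'std', '5')
def pvT3 : List (List Char) := [['r', 'o', 'l', 'l', 'i', 'n', 'g'], ['m', 'i', 'n'], ['5']]  -- ('rolling', 'min', '5')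
def pvT4 : List (List Char) := [['r', 'o', 'l', 'l', 'i', 'n', 'g'], ['m', 'a', 'x'], ['5']]  -- ('rolling', 'max', '5')
def pvT5 : List (List Char) := [['l', 'a', 'g'], ['1']]  -- ('lag', '1')
def pvT6 : List (List Char) := [['l', 'a', 'g'], ['3']]  -- ('lag', '3')
def pvT7 : List (List Char) := [['l', 'a', 'g'], ['5']]  -- ('lag', '5')
def pvT8 : List (List Char) := [['r', 'a', 't', 'e'], ['o', 'f'], ['c', 'h', 'a', 'n', 'g', 'e'], ['5']]  -- ('rate', 'of', 'change', '5')
def pvT9 : List (List Char) := [['r', 'a', 't', 'e'], ['o', 'f'], ['c', 'h', 'a', 'n', 'g', 'e'], ['3', '0']]  -- ('rate', 'of', 'change', '30')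
def pvT10 : List (List Char) := [['r', 'o', 'c'], ['5']]  -- ('roc', '5')
def pvT11 : List (List Char) := [['r', 'o', 'c'], ['3', '0']]  -- ('roc', '30')

def pvS4 : List (List (List Char)) := [pvT8, pvT9]
def pvS3 : List (List (List Char)) := [pvT1, pvT2, pvT3, pvT4]
def pvS2 : List (List (List Char)) := [pvT5, pvT6, pvT7, pvT10, pvT11]
def pvKOpts : List (Int × List (List (List Char))) := [(4, pvS4), (3, pvS3), (2, pvS2)]

-- Source B's loop over ((4,_S4),(3,_S3),(2,_S2)) with early return; parts[-k:] / parts[:-k] are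
-- PySem.List.slice with negative bounds, "_".join is PySem.Chars.join
def pvLoopB (s : List Char) (parts : List (List Char)) : List (Int × List (List (List Char))) → List Char
  | [] => s
  | (k, opts) :: rest =>
      if k < (parts.length : Int) ∧ PySem.List.slice parts (some (-k)) none ∈ opts then
        PySem.Chars.join ['_'] (PySem.List.slice parts none (some (-k)))
      else pvLoopB s parts rest

-- name.split("_") with the nonempty separator "_" is PySem.Chars.splitOn (the sep ≠ "" form of str.split)
def resolve_base_feature_py_alt (name : String) : Option String :=
  if name = "machine_id_encoded" then none
  else some (String.ofList (pvLoopB name.toList (PySem.Chars.splitOn name.toList ['_']) pvKOpts))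

-- ===== PRECONDITION & SPEC =====
def Spec_resolve_base_feature_py (name : String) (out : Option String) : Prop := out = resolve_base_feature_py_alt name
instance (name : String) (out : Option String) : Decidable (Spec_resolve_base_feature_py name out) := by unfold Spec_resolve_base_feature_py; infer_instance

-- ===== CLAIM (what is proved, stated in full; the proofs are below) =====
def Claim_equal_resolve_base_feature_py : Prop := ∀ (name : String), Dom_resolve_base_feature_py name → Spec_resolve_base_feature_py name (resolve_base_feature_py name)

-- ===== LEMMAS AND PROOFS =====

-- proof-side model of str.split('_')
def pvSp : List Char → List (List Char)
  | [] => [[]]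
  | c :: l => if c = '_' then [] :: pvSp l else (pvSp l).modifyHead (fun p => c :: p)

lemma pvSp_ne_nil (l : List Char) : pvSp l ≠ [] := by
  induction l with
  | nil => simp [pvSp]
  | cons c l ih =>
    simp only [pvSp]
    split
    · simp
    · cases h : pvSp l with
      | nil => exact absurd h ih
      | cons a t => simp

lemma pvGo_eq (fuel : Nat) (l cur acc : _) (h : l.length ≤ fuel) :
    PySem.Chars.splitOn.go ['_'] fuel l cur acc
      = acc.reverse ++ (pvSp l).modifyHead (fun x => cur.reverse ++ x) := by
  induction fuel generalizing l cur acc with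
  | zero =>
    have hl : l = [] := by cases l with | nil => rfl | cons c t => simp at h
    subst hl
    simp [PySem.Chars.splitOn.go, pvSp]
  | succ f ih =>
    cases l with
    | nil => simp [PySem.Chars.splitOn.go, pvSp]
    | cons c rest =>
      simp only [PySem.Chars.splitOn.go]
      by_cases hc : c = '_'
      · subst hc
        rw [if_pos (by simp [List.isPrefixOf])]
        rw [ih (List.drop ['_'].length ('_' :: rest)) [] (cur.reverse :: acc)
              (by simpa using Nat.le_of_succ_le_succ h)]
        cases hsp : pvSp rest <;> simp [pvSp, hsp]
      · rw [if_neg (by simp [List.isPrefixOf, Ne.symm hc])]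
        rw [ih rest (c :: cur) acc (Nat.le_of_succ_le_succ h)]
        simp only [pvSp, if_neg hc]
        cases hsp : pvSp rest with
        | nil => simp
        | cons a t => simp [List.modifyHead_cons, List.append_assoc]

lemma pvSplitOn_eq (l : List Char) : PySem.Chars.splitOn l ['_'] = pvSp l := by
  have h := pvGo_eq (l.length + 1) l [] [] (by omega)
  have h2 : List.modifyHead (fun x => x) (pvSp l) = pvSp l := by cases pvSp l <;> simp
  simpa [PySem.Chars.splitOn, h2] using h

lemma pvSp_sep_append (xs ys : List Char) : pvSp (xs ++ '_' :: ys) = pvSp xs ++ pvSp ys := by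
  induction xs with
  | nil => simp [pvSp]
  | cons c xs ih =>
    by_cases hc : c = '_'
    · subst hc; simp [pvSp, ih]
    · simp only [List.cons_append, pvSp, if_neg hc, ih]
      cases h : pvSp xs with
      | nil => exact absurd h (pvSp_ne_nil xs)
      | cons a t => simp [List.modifyHead_cons]

lemma pvSp_no_sep (p : List Char) (h : '_' ∉ p) : pvSp p = [p] := by
  induction p with
  | nil => simp [pvSp]
  | cons c q ih =>
    have hc : ¬ c = '_' := by intro e; exact h (by simp [e])
    have hq : '_' ∉ q := fun m => h (List.mem_cons_of_mem _ m)
    simp [pvSp, hc, ih hq, List.modifyHead_cons]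

lemma pvJ_sp (l : List Char) : PySem.Chars.join ['_'] (pvSp l) = l := by
  induction l with
  | nil => simp [pvSp, PySem.Chars.join_singleton]
  | cons c l ih =>
    by_cases hc : c = '_'
    · subst hc
      cases h : pvSp l with
      | nil => exact absurd h (pvSp_ne_nil l)
      | cons a t =>
        rw [h] at ih
        have hsp : pvSp ('_' :: l) = [] :: pvSp l := by simp [pvSp]
        rw [hsp, h, PySem.Chars.join_cons_cons, ih]
        simp
    · cases h : pvSp l with
      | nil => exact absurd h (pvSp_ne_nil l)
      | cons a t =>
        rw [h] at ih
        simp only [pvSp, if_neg hc, h, List.modifyHead_cons]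
        cases t with
        | nil =>
          rw [PySem.Chars.join_singleton] at ih
          rw [PySem.Chars.join_singleton, ih]
        | cons b t' =>
          rw [PySem.Chars.join_cons_cons] at ih
          rw [PySem.Chars.join_cons_cons, ← ih]
          simp

lemma pvJ_append (a b : List (List Char)) (ha : a ≠ []) (hb : b ≠ []) :
    PySem.Chars.join ['_'] (a ++ b)
      = PySem.Chars.join ['_'] a ++ '_' :: PySem.Chars.join ['_'] b := by
  induction a with
  | nil => exact absurd rfl ha
  | cons x a ih =>
    cases a with
    | nil =>
      cases b with
      | nil => exact absurd rfl hb
      | cons y t => simp [PySem.Chars.join_singleton, PySem.Chars.join_cons_cons]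
    | cons x' a' =>
      have ih' := ih (by simp)
      rw [List.cons_append, List.cons_append, PySem.Chars.join_cons_cons]
      rw [List.cons_append] at ih'
      rw [ih', PySem.Chars.join_cons_cons]
      simp [List.append_assoc]

lemma pvSp_J (ps : List (List Char)) (h : ∀ p ∈ ps, '_' ∉ p) (hne : ps ≠ []) :
    pvSp (PySem.Chars.join ['_'] ps) = ps := by
  induction ps with
  | nil => exact absurd rfl hne
  | cons p ps ih =>
    cases ps with
    | nil =>
      rw [PySem.Chars.join_singleton]
      exact pvSp_no_sep p (h p (by simp))
    | cons q t =>
      rw [PySem.Chars.join_cons_cons]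
      have he : p ++ ['_'] ++ PySem.Chars.join ['_'] (q :: t)
          = p ++ '_' :: PySem.Chars.join ['_'] (q :: t) := by simp
      rw [he, pvSp_sep_append, pvSp_no_sep p (h p (by simp)),
          ih (fun x hx => h x (by simp [hx])) (by simp)]
      rfl

lemma pvMatch_mpr (l : List Char) (segs : List (List Char)) (hne : segs ≠ [])
    (hfree : ∀ p ∈ segs, '_' ∉ p)
    (h : ('_' :: PySem.Chars.join ['_'] segs) <:+ l) :
    segs.length < (pvSp l).length ∧ (pvSp l).drop ((pvSp l).length - segs.length) = segs := by
  obtain ⟨base, hb⟩ := h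
  have hsp : pvSp l = pvSp base ++ segs := by
    rw [← hb, pvSp_sep_append, pvSp_J segs hfree hne]
  have hpos : 0 < (pvSp base).length := List.length_pos_of_ne_nil (pvSp_ne_nil base)
  constructor
  · rw [hsp, List.length_append]
    have : 0 < segs.length := List.length_pos_of_ne_nil hne
    omega
  · rw [hsp, List.length_append]
    have he : (pvSp base).length + segs.length - segs.length = (pvSp base).length := by omega
    rw [he, List.drop_left]

lemma pvMatch_mp (l : List Char) (segs : List (List Char)) (hne : segs ≠ [])
    (hfree : ∀ p ∈ segs, '_' ∉ p)
    (hk : segs.length < (pvSp l).length)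
    (hd : (pvSp l).drop ((pvSp l).length - segs.length) = segs) :
    ('_' :: PySem.Chars.join ['_'] segs) <:+ l := by
  have hsplit : pvSp l = (pvSp l).take ((pvSp l).length - segs.length) ++ segs := by
    conv_lhs => rw [← List.take_append_drop ((pvSp l).length - segs.length) (pvSp l)]
    rw [hd]
  have hlen : ((pvSp l).take ((pvSp l).length - segs.length)).length
      = (pvSp l).length - segs.length := by
    rw [List.length_take]; omega
  have htne : (pvSp l).take ((pvSp l).length - segs.length) ≠ [] := by
    intro he
    rw [he] at hlen
    simp at hlen
    omega
  have hl : l = PySem.Chars.join ['_'] ((pvSp l).take ((pvSp l).length - segs.length))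
      ++ '_' :: PySem.Chars.join ['_'] segs := by
    conv_lhs => rw [← pvJ_sp l]; rw [hsplit]
    rw [pvJ_append _ _ htne hne]
  exact ⟨_, hl.symm⟩

lemma pvMatch_out (l : List Char) (segs : List (List Char)) (hne : segs ≠ [])
    (hfree : ∀ p ∈ segs, '_' ∉ p)
    (h : ('_' :: PySem.Chars.join ['_'] segs) <:+ l) :
    PySem.Chars.join ['_'] ((pvSp l).take ((pvSp l).length - segs.length))
      = l.take (l.length - ('_' :: PySem.Chars.join ['_'] segs).length) := by
  obtain ⟨base, hb⟩ := h
  have hsp : pvSp l = pvSp base ++ segs := by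
    rw [← hb, pvSp_sep_append, pvSp_J segs hfree hne]
  have h1 : (pvSp l).length - segs.length = (pvSp base).length := by
    rw [hsp, List.length_append]; omega
  have h2 : (pvSp l).take ((pvSp l).length - segs.length) = pvSp base := by
    rw [h1, hsp, List.take_left]
  have h3 : l.length - ('_' :: PySem.Chars.join ['_'] segs).length = base.length := by
    rw [← hb, List.length_append]; omega
  rw [h2, h3, ← hb, List.take_left, pvJ_sp]

lemma pvEndswith_eq (s p : List Char) : PySem.Chars.endswith s p = decide (p <:+ s) := by
  by_cases h : p <:+ s
  · simp [(PySem.Chars.endswith_iff s p).2 h, h]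
  · have hne : ¬ PySem.Chars.endswith s p = true :=
      fun hc => h ((PySem.Chars.endswith_iff s p).1 hc)
    simp [Bool.not_eq_true] at hne
    simp [hne, h]

lemma pvSliceNeg (s : List Char) (k : Nat) (hk : 0 < k) :
    PySem.Chars.slice s none (some (-(k : Int))) = s.take (s.length - k) := by
  rw [PySem.Chars.slice_eq_listSlice, PySem.List.slice_to_neg_natCast s k hk]

lemma pvExcl {s a b : List Char} (ha : a <:+ s) (h1 : ¬ a <:+ b) (h2 : ¬ b <:+ a) :
    ¬ b <:+ s := by
  intro hb
  rcases le_total a.length b.length with hle | hle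
  · exact h1 (List.suffix_of_suffix_length_le ha hb hle)
  · exact h2 (List.suffix_of_suffix_length_le hb ha hle)


lemma pvM1 (s : List Char) :
    (3 < (pvSp s).length ∧ (pvSp s).drop ((pvSp s).length - 3) = pvT1) ↔ pvSuf1 <:+ s := by
  have hs : ('_' :: PySem.Chars.join ['_'] pvT1) = pvSuf1 := by decide
  constructor
  · rintro ⟨hk, hd⟩
    have h := pvMatch_mp s pvT1 (by decide) (by decide)
      (by rw [show pvT1.length = 3 from by decide]; exact hk)
      (by rw [show pvT1.length = 3 from by decide]; exact hd)
    rw [hs] at h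
    exact h
  · intro h
    rw [← hs] at h
    have h2 := pvMatch_mpr s pvT1 (by decide) (by decide) h
    rw [show pvT1.length = 3 from by decide] at h2
    exact h2

lemma pvMo1 (s : List Char) (h : pvSuf1 <:+ s) :
    PySem.Chars.join ['_'] ((pvSp s).take ((pvSp s).length - 3))
      = s.take (s.length - pvSuf1.length) := by
  have hs : ('_' :: PySem.Chars.join ['_'] pvT1) = pvSuf1 := by decide
  rw [← hs] at h
  have h2 := pvMatch_out s pvT1 (by decide) (by decide) h
  rw [hs, show pvT1.length = 3 from by decide] at h2
  exact h2

lemma pvM2 (s : List Char) :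
    (3 < (pvSp s).length ∧ (pvSp s).drop ((pvSp s).length - 3) = pvT2) ↔ pvSuf2 <:+ s := by
  have hs : ('_' :: PySem.Chars.join ['_'] pvT2) = pvSuf2 := by decide
  constructor
  · rintro ⟨hk, hd⟩
    have h := pvMatch_mp s pvT2 (by decide) (by decide)
      (by rw [show pvT2.length = 3 from by decide]; exact hk)
      (by rw [show pvT2.length = 3 from by decide]; exact hd)
    rw [hs] at h
    exact h
  · intro h
    rw [← hs] at h
    have h2 := pvMatch_mpr s pvT2 (by decide) (by decide) h
    rw [show pvT2.length = 3 from by decide] at h2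
    exact h2

lemma pvMo2 (s : List Char) (h : pvSuf2 <:+ s) :
    PySem.Chars.join ['_'] ((pvSp s).take ((pvSp s).length - 3))
      = s.take (s.length - pvSuf2.length) := by
  have hs : ('_' :: PySem.Chars.join ['_'] pvT2) = pvSuf2 := by decide
  rw [← hs] at h
  have h2 := pvMatch_out s pvT2 (by decide) (by decide) h
  rw [hs, show pvT2.length = 3 from by decide] at h2
  exact h2

lemma pvM3 (s : List Char) :
    (3 < (pvSp s).length ∧ (pvSp s).drop ((pvSp s).length - 3) = pvT3) ↔ pvSuf3 <:+ s := by
  have hs : ('_' :: PySem.Chars.join ['_'] pvT3) = pvSuf3 := by decide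
  constructor
  · rintro ⟨hk, hd⟩
    have h := pvMatch_mp s pvT3 (by decide) (by decide)
      (by rw [show pvT3.length = 3 from by decide]; exact hk)
      (by rw [show pvT3.length = 3 from by decide]; exact hd)
    rw [hs] at h
    exact h
  · intro h
    rw [← hs] at h
    have h2 := pvMatch_mpr s pvT3 (by decide) (by decide) h
    rw [show pvT3.length = 3 from by decide] at h2
    exact h2

lemma pvMo3 (s : List Char) (h : pvSuf3 <:+ s) :
    PySem.Chars.join ['_'] ((pvSp s).take ((pvSp s).length - 3))
      = s.take (s.length - pvSuf3.length) := by
  have hs : ('_' :: PySem.Chars.join ['_'] pvT3) = pvSuf3 := by decide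
  rw [← hs] at h
  have h2 := pvMatch_out s pvT3 (by decide) (by decide) h
  rw [hs, show pvT3.length = 3 from by decide] at h2
  exact h2

lemma pvM4 (s : List Char) :
    (3 < (pvSp s).length ∧ (pvSp s).drop ((pvSp s).length - 3) = pvT4) ↔ pvSuf4 <:+ s := by
  have hs : ('_' :: PySem.Chars.join ['_'] pvT4) = pvSuf4 := by decide
  constructor
  · rintro ⟨hk, hd⟩
    have h := pvMatch_mp s pvT4 (by decide) (by decide)
      (by rw [show pvT4.length = 3 from by decide]; exact hk)
      (by rw [show pvT4.length = 3 from by decide]; exact hd)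
    rw [hs] at h
    exact h
  · intro h
    rw [← hs] at h
    have h2 := pvMatch_mpr s pvT4 (by decide) (by decide) h
    rw [show pvT4.length = 3 from by decide] at h2
    exact h2

lemma pvMo4 (s : List Char) (h : pvSuf4 <:+ s) :
    PySem.Chars.join ['_'] ((pvSp s).take ((pvSp s).length - 3))
      = s.take (s.length - pvSuf4.length) := by
  have hs : ('_' :: PySem.Chars.join ['_'] pvT4) = pvSuf4 := by decide
  rw [← hs] at h
  have h2 := pvMatch_out s pvT4 (by decide) (by decide) h
  rw [hs, show pvT4.length = 3 from by decide] at h2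
  exact h2

lemma pvM5 (s : List Char) :
    (2 < (pvSp s).length ∧ (pvSp s).drop ((pvSp s).length - 2) = pvT5) ↔ pvSuf5 <:+ s := by
  have hs : ('_' :: PySem.Chars.join ['_'] pvT5) = pvSuf5 := by decide
  constructor
  · rintro ⟨hk, hd⟩
    have h := pvMatch_mp s pvT5 (by decide) (by decide)
      (by rw [show pvT5.length = 2 from by decide]; exact hk)
      (by rw [show pvT5.length = 2 from by decide]; exact hd)
    rw [hs] at h
    exact h
  · intro h
    rw [← hs] at h
    have h2 := pvMatch_mpr s pvT5 (by decide) (by decide) h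
    rw [show pvT5.length = 2 from by decide] at h2
    exact h2

lemma pvMo5 (s : List Char) (h : pvSuf5 <:+ s) :
    PySem.Chars.join ['_'] ((pvSp s).take ((pvSp s).length - 2))
      = s.take (s.length - pvSuf5.length) := by
  have hs : ('_' :: PySem.Chars.join ['_'] pvT5) = pvSuf5 := by decide
  rw [← hs] at h
  have h2 := pvMatch_out s pvT5 (by decide) (by decide) h
  rw [hs, show pvT5.length = 2 from by decide] at h2
  exact h2

lemma pvM6 (s : List Char) :
    (2 < (pvSp s).length ∧ (pvSp s).drop ((pvSp s).length - 2) = pvT6) ↔ pvSuf6 <:+ s := by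
  have hs : ('_' :: PySem.Chars.join ['_'] pvT6) = pvSuf6 := by decide
  constructor
  · rintro ⟨hk, hd⟩
    have h := pvMatch_mp s pvT6 (by decide) (by decide)
      (by rw [show pvT6.length = 2 from by decide]; exact hk)
      (by rw [show pvT6.length = 2 from by decide]; exact hd)
    rw [hs] at h
    exact h
  · intro h
    rw [← hs] at h
    have h2 := pvMatch_mpr s pvT6 (by decide) (by decide) h
    rw [show pvT6.length = 2 from by decide] at h2
    exact h2

lemma pvMo6 (s : List Char) (h : pvSuf6 <:+ s) :
    PySem.Chars.join ['_'] ((pvSp s).take ((pvSp s).length - 2))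
      = s.take (s.length - pvSuf6.length) := by
  have hs : ('_' :: PySem.Chars.join ['_'] pvT6) = pvSuf6 := by decide
  rw [← hs] at h
  have h2 := pvMatch_out s pvT6 (by decide) (by decide) h
  rw [hs, show pvT6.length = 2 from by decide] at h2
  exact h2

lemma pvM7 (s : List Char) :
    (2 < (pvSp s).length ∧ (pvSp s).drop ((pvSp s).length - 2) = pvT7) ↔ pvSuf7 <:+ s := by
  have hs : ('_' :: PySem.Chars.join ['_'] pvT7) = pvSuf7 := by decide
  constructor
  · rintro ⟨hk, hd⟩
    have h := pvMatch_mp s pvT7 (by decide) (by decide)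
      (by rw [show pvT7.length = 2 from by decide]; exact hk)
      (by rw [show pvT7.length = 2 from by decide]; exact hd)
    rw [hs] at h
    exact h
  · intro h
    rw [← hs] at h
    have h2 := pvMatch_mpr s pvT7 (by decide) (by decide) h
    rw [show pvT7.length = 2 from by decide] at h2
    exact h2

lemma pvMo7 (s : List Char) (h : pvSuf7 <:+ s) :
    PySem.Chars.join ['_'] ((pvSp s).take ((pvSp s).length - 2))
      = s.take (s.length - pvSuf7.length) := by
  have hs : ('_' :: PySem.Chars.join ['_'] pvT7) = pvSuf7 := by decide
  rw [← hs] at h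
  have h2 := pvMatch_out s pvT7 (by decide) (by decide) h
  rw [hs, show pvT7.length = 2 from by decide] at h2
  exact h2

lemma pvM8 (s : List Char) :
    (4 < (pvSp s).length ∧ (pvSp s).drop ((pvSp s).length - 4) = pvT8) ↔ pvSuf8 <:+ s := by
  have hs : ('_' :: PySem.Chars.join ['_'] pvT8) = pvSuf8 := by decide
  constructor
  · rintro ⟨hk, hd⟩
    have h := pvMatch_mp s pvT8 (by decide) (by decide)
      (by rw [show pvT8.length = 4 from by decide]; exact hk)
      (by rw [show pvT8.length = 4 from by decide]; exact hd)
    rw [hs] at h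
    exact h
  · intro h
    rw [← hs] at h
    have h2 := pvMatch_mpr s pvT8 (by decide) (by decide) h
    rw [show pvT8.length = 4 from by decide] at h2
    exact h2

lemma pvMo8 (s : List Char) (h : pvSuf8 <:+ s) :
    PySem.Chars.join ['_'] ((pvSp s).take ((pvSp s).length - 4))
      = s.take (s.length - pvSuf8.length) := by
  have hs : ('_' :: PySem.Chars.join ['_'] pvT8) = pvSuf8 := by decide
  rw [← hs] at h
  have h2 := pvMatch_out s pvT8 (by decide) (by decide) h
  rw [hs, show pvT8.length = 4 from by decide] at h2
  exact h2

lemma pvM9 (s : List Char) :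
    (4 < (pvSp s).length ∧ (pvSp s).drop ((pvSp s).length - 4) = pvT9) ↔ pvSuf9 <:+ s := by
  have hs : ('_' :: PySem.Chars.join ['_'] pvT9) = pvSuf9 := by decide
  constructor
  · rintro ⟨hk, hd⟩
    have h := pvMatch_mp s pvT9 (by decide) (by decide)
      (by rw [show pvT9.length = 4 from by decide]; exact hk)
      (by rw [show pvT9.length = 4 from by decide]; exact hd)
    rw [hs] at h
    exact h
  · intro h
    rw [← hs] at h
    have h2 := pvMatch_mpr s pvT9 (by decide) (by decide) h
    rw [show pvT9.length = 4 from by decide] at h2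
    exact h2

lemma pvMo9 (s : List Char) (h : pvSuf9 <:+ s) :
    PySem.Chars.join ['_'] ((pvSp s).take ((pvSp s).length - 4))
      = s.take (s.length - pvSuf9.length) := by
  have hs : ('_' :: PySem.Chars.join ['_'] pvT9) = pvSuf9 := by decide
  rw [← hs] at h
  have h2 := pvMatch_out s pvT9 (by decide) (by decide) h
  rw [hs, show pvT9.length = 4 from by decide] at h2
  exact h2

lemma pvM10 (s : List Char) :
    (2 < (pvSp s).length ∧ (pvSp s).drop ((pvSp s).length - 2) = pvT10) ↔ pvSuf10 <:+ s := by
  have hs : ('_' :: PySem.Chars.join ['_'] pvT10) = pvSuf10 := by decide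
  constructor
  · rintro ⟨hk, hd⟩
    have h := pvMatch_mp s pvT10 (by decide) (by decide)
      (by rw [show pvT10.length = 2 from by decide]; exact hk)
      (by rw [show pvT10.length = 2 from by decide]; exact hd)
    rw [hs] at h
    exact h
  · intro h
    rw [← hs] at h
    have h2 := pvMatch_mpr s pvT10 (by decide) (by decide) h
    rw [show pvT10.length = 2 from by decide] at h2
    exact h2

lemma pvMo10 (s : List Char) (h : pvSuf10 <:+ s) :
    PySem.Chars.join ['_'] ((pvSp s).take ((pvSp s).length - 2))
      = s.take (s.length - pvSuf10.length) := by
  have hs : ('_' :: PySem.Chars.join ['_'] pvT10) = pvSuf10 := by decide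
  rw [← hs] at h
  have h2 := pvMatch_out s pvT10 (by decide) (by decide) h
  rw [hs, show pvT10.length = 2 from by decide] at h2
  exact h2

lemma pvM11 (s : List Char) :
    (2 < (pvSp s).length ∧ (pvSp s).drop ((pvSp s).length - 2) = pvT11) ↔ pvSuf11 <:+ s := by
  have hs : ('_' :: PySem.Chars.join ['_'] pvT11) = pvSuf11 := by decide
  constructor
  · rintro ⟨hk, hd⟩
    have h := pvMatch_mp s pvT11 (by decide) (by decide)
      (by rw [show pvT11.length = 2 from by decide]; exact hk)
      (by rw [show pvT11.length = 2 from by decide]; exact hd)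
    rw [hs] at h
    exact h
  · intro h
    rw [← hs] at h
    have h2 := pvMatch_mpr s pvT11 (by decide) (by decide) h
    rw [show pvT11.length = 2 from by decide] at h2
    exact h2

lemma pvMo11 (s : List Char) (h : pvSuf11 <:+ s) :
    PySem.Chars.join ['_'] ((pvSp s).take ((pvSp s).length - 2))
      = s.take (s.length - pvSuf11.length) := by
  have hs : ('_' :: PySem.Chars.join ['_'] pvT11) = pvSuf11 := by decide
  rw [← hs] at h
  have h2 := pvMatch_out s pvT11 (by decide) (by decide) h
  rw [hs, show pvT11.length = 2 from by decide] at h2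
  exact h2

lemma pvC4_iff (s : List Char) :
    ((4 : Int) < ((pvSp s).length : Int) ∧
      PySem.List.slice (pvSp s) (some (-(4 : Int))) none ∈ pvS4) ↔ (pvSuf8 <:+ s ∨ pvSuf9 <:+ s) := by
  rw [PySem.List.slice_from_neg_ofNat (pvSp s) 4 (by omega)]
  constructor
  · rintro ⟨hkI, hm⟩
    have hk : 4 < (pvSp s).length := by exact_mod_cast hkI
    simp only [pvS4, List.mem_cons, List.not_mem_nil, or_false] at hm
    rcases hm with h|h
    · exact Or.inl ((pvM8 s).1 ⟨hk, h⟩)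
    · exact Or.inr (((pvM9 s).1 ⟨hk, h⟩))
  · intro hor
    have hk : 4 < (pvSp s).length ∧ (pvSp s).drop ((pvSp s).length - 4) ∈ pvS4 := by
      rcases hor with h|h
      · obtain ⟨hk, hd⟩ := (pvM8 s).2 h
        exact ⟨hk, by simp [pvS4, hd]⟩
      · obtain ⟨hk, hd⟩ := (pvM9 s).2 h
        exact ⟨hk, by simp [pvS4, hd]⟩
    exact ⟨by exact_mod_cast hk.1, hk.2⟩

lemma pvC3_iff (s : List Char) :
    ((3 : Int) < ((pvSp s).length : Int) ∧
      PySem.List.slice (pvSp s) (some (-(3 : Int))) none ∈ pvS3) ↔ (pvSuf1 <:+ s ∨ pvSuf2 <:+ s ∨ pvSuf3 <:+ s ∨ pvSuf4 <:+ s) := by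
  rw [PySem.List.slice_from_neg_ofNat (pvSp s) 3 (by omega)]
  constructor
  · rintro ⟨hkI, hm⟩
    have hk : 3 < (pvSp s).length := by exact_mod_cast hkI
    simp only [pvS3, List.mem_cons, List.not_mem_nil, or_false] at hm
    rcases hm with h|h|h|h
    · exact Or.inl ((pvM1 s).1 ⟨hk, h⟩)
    · exact Or.inr (Or.inl ((pvM2 s).1 ⟨hk, h⟩))
    · exact Or.inr (Or.inr (Or.inl ((pvM3 s).1 ⟨hk, h⟩)))
    · exact Or.inr (Or.inr (Or.inr (((pvM4 s).1 ⟨hk, h⟩))))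
  · intro hor
    have hk : 3 < (pvSp s).length ∧ (pvSp s).drop ((pvSp s).length - 3) ∈ pvS3 := by
      rcases hor with h|h|h|h
      · obtain ⟨hk, hd⟩ := (pvM1 s).2 h
        exact ⟨hk, by simp [pvS3, hd]⟩
      · obtain ⟨hk, hd⟩ := (pvM2 s).2 h
        exact ⟨hk, by simp [pvS3, hd]⟩
      · obtain ⟨hk, hd⟩ := (pvM3 s).2 h
        exact ⟨hk, by simp [pvS3, hd]⟩
      · obtain ⟨hk, hd⟩ := (pvM4 s).2 h
        exact ⟨hk, by simp [pvS3, hd]⟩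
    exact ⟨by exact_mod_cast hk.1, hk.2⟩

lemma pvC2_iff (s : List Char) :
    ((2 : Int) < ((pvSp s).length : Int) ∧
      PySem.List.slice (pvSp s) (some (-(2 : Int))) none ∈ pvS2) ↔ (pvSuf5 <:+ s ∨ pvSuf6 <:+ s ∨ pvSuf7 <:+ s ∨ pvSuf10 <:+ s ∨ pvSuf11 <:+ s) := by
  rw [PySem.List.slice_from_neg_ofNat (pvSp s) 2 (by omega)]
  constructor
  · rintro ⟨hkI, hm⟩
    have hk : 2 < (pvSp s).length := by exact_mod_cast hkI
    simp only [pvS2, List.mem_cons, List.not_mem_nil, or_false] at hm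
    rcases hm with h|h|h|h|h
    · exact Or.inl ((pvM5 s).1 ⟨hk, h⟩)
    · exact Or.inr (Or.inl ((pvM6 s).1 ⟨hk, h⟩))
    · exact Or.inr (Or.inr (Or.inl ((pvM7 s).1 ⟨hk, h⟩)))
    · exact Or.inr (Or.inr (Or.inr (Or.inl ((pvM10 s).1 ⟨hk, h⟩))))
    · exact Or.inr (Or.inr (Or.inr (Or.inr (((pvM11 s).1 ⟨hk, h⟩)))))
  · intro hor
    have hk : 2 < (pvSp s).length ∧ (pvSp s).drop ((pvSp s).length - 2) ∈ pvS2 := by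
      rcases hor with h|h|h|h|h
      · obtain ⟨hk, hd⟩ := (pvM5 s).2 h
        exact ⟨hk, by simp [pvS2, hd]⟩
      · obtain ⟨hk, hd⟩ := (pvM6 s).2 h
        exact ⟨hk, by simp [pvS2, hd]⟩
      · obtain ⟨hk, hd⟩ := (pvM7 s).2 h
        exact ⟨hk, by simp [pvS2, hd]⟩
      · obtain ⟨hk, hd⟩ := (pvM10 s).2 h
        exact ⟨hk, by simp [pvS2, hd]⟩
      · obtain ⟨hk, hd⟩ := (pvM11 s).2 h
        exact ⟨hk, by simp [pvS2, hd]⟩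
    exact ⟨by exact_mod_cast hk.1, hk.2⟩

lemma pvAB (s : List Char) : pvLoopA s pvSuffixesA = pvLoopB s (pvSp s) pvKOpts := by
  simp only [pvSuffixesA, pvLoopA, pvEndswith_eq, decide_eq_true_eq, pvKOpts, pvLoopB,
    pvC4_iff, pvC3_iff, pvC2_iff]
  rw [pvSliceNeg s pvSuf1.length (by decide),
      pvSliceNeg s pvSuf2.length (by decide),
      pvSliceNeg s pvSuf3.length (by decide),
      pvSliceNeg s pvSuf4.length (by decide),
      pvSliceNeg s pvSuf5.length (by decide),
      pvSliceNeg s pvSuf6.length (by decide),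
      pvSliceNeg s pvSuf7.length (by decide),
      pvSliceNeg s pvSuf8.length (by decide),
      pvSliceNeg s pvSuf9.length (by decide),
      pvSliceNeg s pvSuf10.length (by decide),
      pvSliceNeg s pvSuf11.length (by decide),
      PySem.List.slice_to_neg_ofNat (pvSp s) 4 (by omega),
      PySem.List.slice_to_neg_ofNat (pvSp s) 3 (by omega),
      PySem.List.slice_to_neg_ofNat (pvSp s) 2 (by omega)]
  by_cases h1 : pvSuf1 <:+ s
  · have hcn4 : ¬ (pvSuf8 <:+ s ∨ pvSuf9 <:+ s) := by
      rintro (h|h)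
      · exact (pvExcl h1 (by decide) (by decide)) h
      · exact (pvExcl h1 (by decide) (by decide)) h
    rw [if_pos h1, if_neg hcn4, if_pos (Or.inl h1)]
    exact (pvMo1 s h1).symm
  by_cases h2 : pvSuf2 <:+ s
  · have hcn4 : ¬ (pvSuf8 <:+ s ∨ pvSuf9 <:+ s) := by
      rintro (h|h)
      · exact (pvExcl h2 (by decide) (by decide)) h
      · exact (pvExcl h2 (by decide) (by decide)) h
    rw [if_neg h1, if_pos h2, if_neg hcn4, if_pos (Or.inr (Or.inl h2))]
    exact (pvMo2 s h2).symm
  by_cases h3 : pvSuf3 <:+ s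
  · have hcn4 : ¬ (pvSuf8 <:+ s ∨ pvSuf9 <:+ s) := by
      rintro (h|h)
      · exact (pvExcl h3 (by decide) (by decide)) h
      · exact (pvExcl h3 (by decide) (by decide)) h
    rw [if_neg h1, if_neg h2, if_pos h3, if_neg hcn4, if_pos (Or.inr (Or.inr (Or.inl h3)))]
    exact (pvMo3 s h3).symm
  by_cases h4 : pvSuf4 <:+ s
  · have hcn4 : ¬ (pvSuf8 <:+ s ∨ pvSuf9 <:+ s) := by
      rintro (h|h)
      · exact (pvExcl h4 (by decide) (by decide)) h
      · exact (pvExcl h4 (by decide) (by decide)) h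
    rw [if_neg h1, if_neg h2, if_neg h3, if_pos h4, if_neg hcn4, if_pos (Or.inr (Or.inr (Or.inr (h4))))]
    exact (pvMo4 s h4).symm
  by_cases h5 : pvSuf5 <:+ s
  · have hcn4 : ¬ (pvSuf8 <:+ s ∨ pvSuf9 <:+ s) := by
      rintro (h|h)
      · exact (pvExcl h5 (by decide) (by decide)) h
      · exact (pvExcl h5 (by decide) (by decide)) h
    have hcn3 : ¬ (pvSuf1 <:+ s ∨ pvSuf2 <:+ s ∨ pvSuf3 <:+ s ∨ pvSuf4 <:+ s) := by
      rintro (h|h|h|h)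
      · exact (pvExcl h5 (by decide) (by decide)) h
      · exact (pvExcl h5 (by decide) (by decide)) h
      · exact (pvExcl h5 (by decide) (by decide)) h
      · exact (pvExcl h5 (by decide) (by decide)) h
    rw [if_neg h1, if_neg h2, if_neg h3, if_neg h4, if_pos h5, if_neg hcn4, if_neg hcn3, if_pos (Or.inl h5)]
    exact (pvMo5 s h5).symm
  by_cases h6 : pvSuf6 <:+ s
  · have hcn4 : ¬ (pvSuf8 <:+ s ∨ pvSuf9 <:+ s) := by
      rintro (h|h)
      · exact (pvExcl h6 (by decide) (by decide)) h
      · exact (pvExcl h6 (by decide) (by decide)) h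
    have hcn3 : ¬ (pvSuf1 <:+ s ∨ pvSuf2 <:+ s ∨ pvSuf3 <:+ s ∨ pvSuf4 <:+ s) := by
      rintro (h|h|h|h)
      · exact (pvExcl h6 (by decide) (by decide)) h
      · exact (pvExcl h6 (by decide) (by decide)) h
      · exact (pvExcl h6 (by decide) (by decide)) h
      · exact (pvExcl h6 (by decide) (by decide)) h
    rw [if_neg h1, if_neg h2, if_neg h3, if_neg h4, if_neg h5, if_pos h6, if_neg hcn4, if_neg hcn3, if_pos (Or.inr (Or.inl h6))]
    exact (pvMo6 s h6).symm
  by_cases h7 : pvSuf7 <:+ s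
  · have hcn4 : ¬ (pvSuf8 <:+ s ∨ pvSuf9 <:+ s) := by
      rintro (h|h)
      · exact (pvExcl h7 (by decide) (by decide)) h
      · exact (pvExcl h7 (by decide) (by decide)) h
    have hcn3 : ¬ (pvSuf1 <:+ s ∨ pvSuf2 <:+ s ∨ pvSuf3 <:+ s ∨ pvSuf4 <:+ s) := by
      rintro (h|h|h|h)
      · exact (pvExcl h7 (by decide) (by decide)) h
      · exact (pvExcl h7 (by decide) (by decide)) h
      · exact (pvExcl h7 (by decide) (by decide)) h
      · exact (pvExcl h7 (by decide) (by decide)) h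
    rw [if_neg h1, if_neg h2, if_neg h3, if_neg h4, if_neg h5, if_neg h6, if_pos h7, if_neg hcn4, if_neg hcn3, if_pos (Or.inr (Or.inr (Or.inl h7)))]
    exact (pvMo7 s h7).symm
  by_cases h8 : pvSuf8 <:+ s
  · rw [if_neg h1, if_neg h2, if_neg h3, if_neg h4, if_neg h5, if_neg h6, if_neg h7, if_pos h8, if_pos (Or.inl h8)]
    exact (pvMo8 s h8).symm
  by_cases h9 : pvSuf9 <:+ s
  · rw [if_neg h1, if_neg h2, if_neg h3, if_neg h4, if_neg h5, if_neg h6, if_neg h7, if_neg h8, if_pos h9, if_pos (Or.inr (h9))]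
    exact (pvMo9 s h9).symm
  by_cases h10 : pvSuf10 <:+ s
  · have hcn4 : ¬ (pvSuf8 <:+ s ∨ pvSuf9 <:+ s) := by
      rintro (h|h)
      · exact (pvExcl h10 (by decide) (by decide)) h
      · exact (pvExcl h10 (by decide) (by decide)) h
    have hcn3 : ¬ (pvSuf1 <:+ s ∨ pvSuf2 <:+ s ∨ pvSuf3 <:+ s ∨ pvSuf4 <:+ s) := by
      rintro (h|h|h|h)
      · exact (pvExcl h10 (by decide) (by decide)) h
      · exact (pvExcl h10 (by decide) (by decide)) h
      · exact (pvExcl h10 (by decide) (by decide)) h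
      · exact (pvExcl h10 (by decide) (by decide)) h
    rw [if_neg h1, if_neg h2, if_neg h3, if_neg h4, if_neg h5, if_neg h6, if_neg h7, if_neg h8, if_neg h9, if_pos h10, if_neg hcn4, if_neg hcn3, if_pos (Or.inr (Or.inr (Or.inr (Or.inl h10))))]
    exact (pvMo10 s h10).symm
  by_cases h11 : pvSuf11 <:+ s
  · have hcn4 : ¬ (pvSuf8 <:+ s ∨ pvSuf9 <:+ s) := by
      rintro (h|h)
      · exact (pvExcl h11 (by decide) (by decide)) h
      · exact (pvExcl h11 (by decide) (by decide)) h
    have hcn3 : ¬ (pvSuf1 <:+ s ∨ pvSuf2 <:+ s ∨ pvSuf3 <:+ s ∨ pvSuf4 <:+ s) := by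
      rintro (h|h|h|h)
      · exact (pvExcl h11 (by decide) (by decide)) h
      · exact (pvExcl h11 (by decide) (by decide)) h
      · exact (pvExcl h11 (by decide) (by decide)) h
      · exact (pvExcl h11 (by decide) (by decide)) h
    rw [if_neg h1, if_neg h2, if_neg h3, if_neg h4, if_neg h5, if_neg h6, if_neg h7, if_neg h8, if_neg h9, if_neg h10, if_pos h11, if_neg hcn4, if_neg hcn3, if_pos (Or.inr (Or.inr (Or.inr (Or.inr (h11)))))]
    exact (pvMo11 s h11).symm
  have hcn4 : ¬ (pvSuf8 <:+ s ∨ pvSuf9 <:+ s) := by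
    rintro (h|h)
    · exact h8 h
    · exact h9 h
  have hcn3 : ¬ (pvSuf1 <:+ s ∨ pvSuf2 <:+ s ∨ pvSuf3 <:+ s ∨ pvSuf4 <:+ s) := by
    rintro (h|h|h|h)
    · exact h1 h
    · exact h2 h
    · exact h3 h
    · exact h4 h
  have hcn2 : ¬ (pvSuf5 <:+ s ∨ pvSuf6 <:+ s ∨ pvSuf7 <:+ s ∨ pvSuf10 <:+ s ∨ pvSuf11 <:+ s) := by
    rintro (h|h|h|h|h)
    · exact h5 h
    · exact h6 h
    · exact h7 h
    · exact h10 h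
    · exact h11 h
  rw [if_neg h1, if_neg h2, if_neg h3, if_neg h4, if_neg h5, if_neg h6, if_neg h7, if_neg h8, if_neg h9, if_neg h10, if_neg h11, if_neg hcn4, if_neg hcn3, if_neg hcn2]

-- ===== VERDICT (by name: the statement is the Claim_ definition above) =====
theorem resolve_base_feature_py_spec : Claim_equal_resolve_base_feature_py := by
  unfold Claim_equal_resolve_base_feature_py
  intro name _
  unfold Spec_resolve_base_feature_py
  by_cases h : name = "machine_id_encoded"
  · simp [resolve_base_feature_py, resolve_base_feature_py_alt, h]
  · simp only [resolve_base_feature_py, resolve_base_feature_py_alt, if_neg h]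
    rw [pvSplitOn_eq, pvAB]
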